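-- pv_equiv track=rewrite | github.com/miliar/Code_Jam_Webscraper | solutions_python/Problem_119/112.py | solve
-- ===== SOURCE A (Python) =====
-- def solve(initial, contents):
--     chests = {}
--     for i in range(len(contents)):
--         chests[i + 1] = (contents[i][0], contents[i][1])
--     keys = {}
--     for key in initial:
--         if key in keys:
--             keys[key] += 1
--         else:
--             keys[key] = 1
--     answer = explore(chests, keys, [], set())
--     if answer:
--         s = ''
--         for i in answer:
--             s += str(i) + ' '
--         return s[:-1]
--     else:
--         return 'IMPOSSIBLE'
--
-- def explore(chests, keys, path, dead):
--     dk = (tuple(sorted([x[0] for x in chests.values()])), tuple(sorted(keys.items())))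
--     if dk in dead:
--         return None
--     if not chests:
--         return path
--     elif not keys:
--         dead.add(dk)
--         return None
--     else:
--         for (chest, (lock, contents)) in sorted(chests.items()):
--             if lock in keys:
--                 new_keys = dict(keys)
--                 for key in contents:
--                     if key in new_keys:
--                         new_keys[key] += 1
--                     else:
--                         new_keys[key] = 1
--                 new_keys[lock] -= 1
--                 if new_keys[lock] == 0:
--                     del new_keys[lock]
--                 new_chests = dict(chests)
--                 del new_chests[chest]
--                 path.append(chest)
--                 answer = explore(new_chests, new_keys, path, dead)
--                 if answer:
--                     return answer
--                 else:
--                     path.pop()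
--     dead.add(dk)
--     return None
-- ===== SOURCE B (Python) =====
-- def spend(keys, lock, cont):
--     """Key multiset after opening a chest: gain cont, use up one `lock` key."""
--     nk = dict(keys)
--     for k in cont:
--         nk[k] = nk.get(k, 0) + 1
--     nk[lock] -= 1
--     if nk[lock] == 0:
--         del nk[lock]
--     return nk
--
-- def search(chests, keys, dead):
--     """Lexicographically first full opening order of `chests` (a list of
--     (number, lock, contents) triples in increasing number order), as a suffix
--     list, or None; `dead` memoises failed (sorted locks, key counts) states."""
--     state = (tuple(sorted(lock for _, lock, _ in chests)), tuple(sorted(keys.items())))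
--     if state in dead:
--         return None, dead
--     if not chests:
--         return [], dead
--     for pos, (chest, lock, cont) in enumerate(chests):
--         if lock in keys:
--             sub, dead = search(chests[:pos] + chests[pos + 1:], spend(keys, lock, cont), dead)
--             if sub is not None:
--                 return [chest] + sub, dead
--     dead.add(state)
--     return None, dead
--
-- def solve(initial, contents):
--     chests = [(i + 1, lock, cont) for i, (lock, cont) in enumerate(contents)]
--     keys = {}
--     for k in initial:
--         keys[k] = keys.get(k, 0) + 1
--     answer, _ = search(chests, keys, set())
--     if answer is None:
--         return 'IMPOSSIBLE'
--     return ' '.join(str(c) for c in answer)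
-- ===== Notes on version B (the rewrite author's own statement) =====
-- stated objective: simpler
-- what changed: The memoized backtracking is rewritten as a pure function over a pre-sorted list of (number, lock, contents) chest triples: the chest dict that A rebuilds and re-sorts at every call disappears, the answer is built by consing onto a returned suffix instead of appending to and popping from a shared mutated path list, and the failed-state memo is threaded through return values.
-- intended difference: On inputs with zero chests (contents == []) A returns 'IMPOSSIBLE' because its shared path list is empty and hence falsy, while B returns '' (the empty opening order), which is the intended answer. — e.g. on solve([1], []): A returns "IMPOSSIBLE", B returns ""
import Mathlib
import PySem

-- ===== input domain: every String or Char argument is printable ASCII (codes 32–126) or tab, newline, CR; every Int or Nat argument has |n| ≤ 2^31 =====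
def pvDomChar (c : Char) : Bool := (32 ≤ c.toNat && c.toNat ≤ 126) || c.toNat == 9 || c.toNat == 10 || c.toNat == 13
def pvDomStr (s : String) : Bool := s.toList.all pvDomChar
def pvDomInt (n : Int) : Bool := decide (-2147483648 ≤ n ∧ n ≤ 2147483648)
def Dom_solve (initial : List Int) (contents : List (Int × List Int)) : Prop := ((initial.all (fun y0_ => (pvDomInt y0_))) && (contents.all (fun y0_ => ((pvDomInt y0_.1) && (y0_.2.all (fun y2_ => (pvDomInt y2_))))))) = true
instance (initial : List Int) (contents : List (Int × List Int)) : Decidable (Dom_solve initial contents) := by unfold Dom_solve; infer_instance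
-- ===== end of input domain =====

-- B replaces A's dict-of-chests + shared mutated path backtracking by a pure backtracking over a
-- pre-sorted list of chest triples (no per-call re-sorting of the chest dict, answers built by cons,
-- the memo set threaded through return values); objective: simpler.  On zero chests B returns the
-- intended '' where A returns 'IMPOSSIBLE' (see D_solve).

abbrev PvDead : Type := PySem.Set (List Int × List (Int × Int))
abbrev PvChest : Type := Int × Int × List Int

-- ===== PORT A =====
-- the body of A's 'for (chest, (lock, contents)) in sorted(chests.items())' loop (the early return
-- becomes: once the state holds an answer, later iterations pass it through); 'recur' is explore at
-- the structurally smaller fuel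
def bodyA (recur : PySem.Dict Int (Int × List Int) → PySem.Dict Int Int → List Int → PvDead → Option (List Int) × PvDead)
    (chests : PySem.Dict Int (Int × List Int)) (keys : PySem.Dict Int Int) (path : List Int)
    (st : Option (List Int) × PvDead) (it : PvChest) : Option (List Int) × PvDead :=
  match st.1 with
  | some _ => st
  | none =>
    if keys.contains it.2.1 then
      let nk := it.2.2.foldl (fun d key => if d.contains key then d.modify key 0 (· + 1) else d.insert key 1) keys
      let nk := nk.modify it.2.1 0 (· - 1)
      let nk := if nk.getD it.2.1 0 = 0 then nk.erase it.2.1 else nk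
      let res := recur (chests.erase it.1) nk (path ++ [it.1]) st.2
      match res.1 with
      | some a => if a = [] then (none, res.2) else (some a, res.2)
      | none => (none, res.2)
    else st

-- A's explore; fuel (= number of chests + 1 at the top call) only makes the recursion structural,
-- it is never exhausted.  sorted(...) of tuples with DISTINCT first components = sort by the first
-- component (the tie-breaking components are never compared), so both sorted(...) calls are ported
-- with key (·.1); this is exact here because dict keys are unique.
def exploreA : Nat → PySem.Dict Int (Int × List Int) → PySem.Dict Int Int → List Int → PvDead → Option (List Int) × PvDead
  | 0, _, _, _, dead => (none, dead)
  | fuel + 1, chests, keys, path, dead =>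
    let dk : List Int × List (Int × Int) :=
      (PySem.List.sorted (chests.values.map (fun x => x.1)) (fun x => x) false,
       PySem.List.sorted keys.items (fun p => p.1) false)
    if PySem.Set.contains dead dk then (none, dead)
    else if chests.items = [] then (some path, dead)
    else if keys.items = [] then (none, PySem.Set.add dead dk)
    else
      let r := (PySem.List.sorted chests.items (fun p => p.1) false).foldl (bodyA (exploreA fuel) chests keys path) (none, dead)
      match r.1 with
      | some a => (some a, r.2)
      | none => (none, PySem.Set.add r.2 dk)

def solve (initial : List Int) (contents : List (Int × List Int)) : String :=
  let chests := (PySem.List.pyRange 0 (PySem.List.len contents)).foldl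
    (fun d i => d.insert (i + 1) ((PySem.List.pyGetD contents i (0, [])).1, (PySem.List.pyGetD contents i (0, [])).2)) PySem.Dict.empty
  let keys := initial.foldl (fun d key => if d.contains key then d.modify key 0 (· + 1) else d.insert key 1) PySem.Dict.empty
  match (exploreA (contents.length + 1) chests keys [] PySem.Set.empty).1 with
  | some a =>
      if a = [] then "IMPOSSIBLE"   -- 'if answer:' — the empty list is falsy
      else String.ofList (PySem.List.slice (a.foldl (fun s i => s ++ PySem.Int.toChars i ++ [' ']) []) none (some (-1)))
  | none => "IMPOSSIBLE"

-- ===== PORT B =====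
-- Source B's spend(keys, lock, cont): the key multiset after opening a chest
def spendB (keys : PySem.Dict Int Int) (lock : Int) (cont : List Int) : PySem.Dict Int Int :=
  let nk := cont.foldl (fun d k => d.insert k (d.getD k 0 + 1)) keys
  let nk := nk.insert lock (nk.getD lock 0 - 1)
  if nk.getD lock 0 = 0 then nk.erase lock else nk

-- Source B's 'for pos, (chest, lock, cont) in enumerate(chests)' loop: 'before' is the reversed prefix
-- chests[:pos], so chests[:pos] + chests[pos+1:] = before.reverse ++ rest; 'recur' is search at the
-- structurally smaller fuel
def loopB (recur : List PvChest → PySem.Dict Int Int → PvDead → Option (List Int) × PvDead)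
    (state : List Int × List (Int × Int)) (keys : PySem.Dict Int Int)
    (before rest : List PvChest) (dead : PvDead) : Option (List Int) × PvDead :=
  match rest with
  | [] => (none, PySem.Set.add dead state)
  | t :: rest =>
    if keys.contains t.2.1 then
      match recur (before.reverse ++ rest) (spendB keys t.2.1 t.2.2) dead with
      | (some sub, dead) => (some (t.1 :: sub), dead)
      | (none, dead) => loopB recur state keys (t :: before) rest dead
    else loopB recur state keys (t :: before) rest dead

-- Source B's search; fuel (= number of chests + 1 at the top call) only makes the recursion structural
def searchB : Nat → List PvChest → PySem.Dict Int Int → PvDead → Option (List Int) × PvDead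
  | 0, _, _, dead => (none, dead)
  | fuel + 1, chests, keys, dead =>
    let state : List Int × List (Int × Int) :=
      (PySem.List.sorted (chests.map (fun t => t.2.1)) (fun x => x) false,
       PySem.List.sorted keys.items (fun p => p.1) false)
    if PySem.Set.contains dead state then (none, dead)
    else if chests = [] then (some [], dead)
    else loopB (searchB fuel) state keys [] chests dead

def solve_alt (initial : List Int) (contents : List (Int × List Int)) : String :=
  let chests : List PvChest := (PySem.List.enumerate contents).map (fun p => (p.1 + 1, p.2.1, p.2.2))
  let keys := initial.foldl (fun d k => d.insert k (d.getD k 0 + 1)) PySem.Dict.empty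
  match (searchB (chests.length + 1) chests keys PySem.Set.empty).1 with
  | none => "IMPOSSIBLE"
  | some a => PySem.Str.join " " (a.map PySem.Int.toStr)

-- ===== PRECONDITION & SPEC =====
-- On inputs with zero chests A returns 'IMPOSSIBLE' (its shared path [] is falsy) while B returns
-- the intended empty order ''.
def D_solve (initial : List Int) (contents : List (Int × List Int)) : Prop := contents = []
instance (initial : List Int) (contents : List (Int × List Int)) : Decidable (D_solve initial contents) := by unfold D_solve; infer_instance

def Spec_solve (initial : List Int) (contents : List (Int × List Int)) (out : String) : Prop := ¬ D_solve initial contents → out = solve_alt initial contents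
instance (initial : List Int) (contents : List (Int × List Int)) (out : String) : Decidable (Spec_solve initial contents out) := by unfold Spec_solve; infer_instance

def pvDiffWitness_solve : List Int × (List (Int × List Int)) := ([1], [])
def pvDiffWitnessOut_solve : String × String := ("IMPOSSIBLE", "")

-- ===== CLAIM (what is proved, stated in full; the proofs are below) =====
def Claim_unchanged_solve : Prop := ∀ (initial : List Int) (contents : List (Int × List Int)), Dom_solve initial contents → Spec_solve initial contents (solve initial contents)
def Claim_changed_solve : Prop := Dom_solve (pvDiffWitness_solve.1) (pvDiffWitness_solve.2) ∧ D_solve (pvDiffWitness_solve.1) (pvDiffWitness_solve.2) ∧ solve (pvDiffWitness_solve.1) (pvDiffWitness_solve.2) = pvDiffWitnessOut_solve.1 ∧ solve_alt (pvDiffWitness_solve.1) (pvDiffWitness_solve.2) = pvDiffWitnessOut_solve.2 ∧ pvDiffWitnessOut_solve.1 ≠ pvDiffWitnessOut_solve.2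
def Claim_exact_solve : Prop := ∀ (initial : List Int) (contents : List (Int × List Int)), Dom_solve initial contents → D_solve initial contents → solve initial contents ≠ solve_alt initial contents

-- ===== LEMMAS AND PROOFS =====

-- the two key-counting updates agree (Dict.modify IS insert-of-getD by definition)
lemma addOne_eq (d : PySem.Dict Int Int) (k : Int) :
    (if d.contains k then d.modify k 0 (· + 1) else d.insert k 1) = d.insert k (d.getD k 0 + 1) := by
  by_cases h : d.contains k = true
  · simp [h, PySem.Dict.modify]
  · simp only [Bool.not_eq_true] at h
    simp [h, PySem.Dict.getD_of_not_contains d 0 h]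

-- A's inner key bookkeeping is B's spend
lemma bodyA_nk_eq (keys : PySem.Dict Int Int) (t : PvChest) :
    (let nk := t.2.2.foldl (fun d key => if d.contains key then d.modify key 0 (· + 1) else d.insert key 1) keys
     let nk := nk.modify t.2.1 0 (· - 1)
     if nk.getD t.2.1 0 = 0 then nk.erase t.2.1 else nk) = spendB keys t.2.1 t.2.2 := by
  have hnk : t.2.2.foldl (fun d key => if d.contains key then d.modify key 0 (· + 1) else d.insert key 1) keys
      = t.2.2.foldl (fun d k => d.insert k (d.getD k 0 + 1)) keys :=
    PySem.List.foldl_congr_mem _ _ _ _ (fun acc x _ => addOne_eq acc x)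
  simp only [spendB, hnk]
  rfl

-- one step of A's loop from a not-yet-successful state, openable chest
lemma bodyA_none (recur) (cd : PySem.Dict Int (Int × List Int)) (keys) (path) (dead : PvDead)
    (t : PvChest) (hc : keys.contains t.2.1 = true) :
    bodyA recur cd keys path (none, dead) t =
      ((match (recur (cd.erase t.1) (spendB keys t.2.1 t.2.2) (path ++ [t.1]) dead).1 with
        | some a => if a = [] then none else some a
        | none => none),
       (recur (cd.erase t.1) (spendB keys t.2.1 t.2.2) (path ++ [t.1]) dead).2) := by
  simp only [bodyA, hc, if_true]
  rw [bodyA_nk_eq keys t]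
  rcases (recur (cd.erase t.1) (spendB keys t.2.1 t.2.2) (path ++ [t.1]) dead) with ⟨o, d⟩
  cases o with
  | some a => by_cases ha : a = [] <;> simp [ha]
  | none => rfl

lemma bodyA_skip (recur) (cd : PySem.Dict Int (Int × List Int)) (keys) (path) (dead : PvDead)
    (t : PvChest) (hc : keys.contains t.2.1 = false) :
    bodyA recur cd keys path (none, dead) t = (none, dead) := by
  simp [bodyA, hc]

-- once the fold state holds an answer, A's loop body only passes it through
lemma foldl_bodyA_some (recur) (chests) (keys) (path) (l : List PvChest) (a : List Int) (d : PvDead) :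
    l.foldl (bodyA recur chests keys path) (some a, d) = (some a, d) := by
  induction l with
  | nil => rfl
  | cons x xs ih => simpa [List.foldl, bodyA] using ih

-- with no keys at all, B's loop scans through and records the state dead
lemma loopB_keys_empty (recur) (state) (keys : PySem.Dict Int Int) (hk : keys.items = [])
    (rest : List PvChest) : ∀ before dead, loopB recur state keys before rest dead = (none, PySem.Set.add dead state) := by
  induction rest with
  | nil => intro before dead; rfl
  | cons t rest ih =>
      intro before dead
      have hc : keys.contains t.2.1 = false := by
        simp [PySem.Dict.contains, hk]
      simp only [loopB, hc, Bool.false_eq_true, if_false]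
      exact ih _ _

-- deleting the key of t from a key-sorted association list removes exactly t
lemma erase_items_eq (u v : List PvChest) (t : PvChest)
    (hp : (u ++ t :: v).Pairwise (fun a b => a.1 < b.1)) :
    (u ++ t :: v).filter (fun p => !(p.1 == t.1)) = u ++ v := by
  rw [List.pairwise_append] at hp
  obtain ⟨hu, hv, huv⟩ := hp
  rw [List.pairwise_cons] at hv
  rw [List.filter_append, List.filter_cons]
  have h1 : u.filter (fun p => !(p.1 == t.1)) = u := by
    apply List.filter_eq_self.mpr
    intro x hx
    have := huv x hx t (List.mem_cons_self ..)
    simp; omega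
  have h2 : v.filter (fun p => !(p.1 == t.1)) = v := by
    apply List.filter_eq_self.mpr
    intro x hx
    have := hv.1 x hx
    simp; omega
  simp [h1, h2]

-- a successful B-answer on a nonempty chest list is nonempty (it starts with the opened chest)
lemma loopB_some_cons (recur) (state) (keys) :
    ∀ (rest before : List PvChest) (dead : PvDead) (s : List Int),
      (loopB recur state keys before rest dead).1 = some s → s ≠ [] := by
  intro rest
  induction rest with
  | nil => intro before dead s h; simp [loopB] at h
  | cons t rest ih =>
      intro before dead s h
      by_cases hc : keys.contains t.2.1 = true
      · simp only [loopB, hc, if_true] at h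
        rcases hr : (recur (before.reverse ++ rest) (spendB keys t.2.1 t.2.2) dead) with ⟨o, dd⟩
        rw [hr] at h
        cases o with
        | some sub =>
            injection h with h
            exact h ▸ List.cons_ne_nil t.1 sub
        | none => exact ih _ _ _ h
      · simp only [Bool.not_eq_true] at hc
        simp only [loopB, hc, Bool.false_eq_true, if_false] at h
        exact ih _ _ _ h

lemma searchB_some_ne_nil (fuel : Nat) (cl : List PvChest) (keys) (dead) (s : List Int)
    (hne : cl ≠ []) (h : (searchB fuel cl keys dead).1 = some s) : s ≠ [] := by
  cases fuel with
  | zero => simp [searchB] at h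
  | succ f =>
      simp only [searchB] at h
      split at h
      · simp at h
      · exact loopB_some_cons _ _ _ _ _ _ _ h

-- the central simulation: A's explore = B's search with the path prefixed
lemma explore_eq (fuel : Nat) :
    ∀ (cd : PySem.Dict Int (Int × List Int)) (cl : List PvChest) (keys : PySem.Dict Int Int)
      (path : List Int) (dead : PvDead),
      cd.items = cl → cl.Pairwise (fun a b => a.1 < b.1) →
      exploreA fuel cd keys path dead
        = ((searchB fuel cl keys dead).1.map (fun s => path ++ s), (searchB fuel cl keys dead).2) := by
  induction fuel with
  | zero => intro cd cl keys path dead _ _; simp [exploreA, searchB]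
  | succ f ih =>
    intro cd cl keys path dead hitems hpair
    have hvals : cd.values.map (fun x => x.1) = cl.map (fun t => t.2.1) := by
      simp only [PySem.Dict.values, hitems, List.map_map]; rfl
    simp only [exploreA, searchB, hitems, hvals]
    by_cases hdead : PySem.Set.contains dead
        (PySem.List.sorted (cl.map (fun t => t.2.1)) (fun x => x) false,
         PySem.List.sorted keys.items (fun p => p.1) false) = true
    · rw [if_pos hdead, if_pos hdead]; simp
    · rw [if_neg hdead, if_neg hdead]
      by_cases hnil : cl = []
      · rw [if_pos hnil, if_pos hnil]; simp
      · rw [if_neg hnil, if_neg hnil]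
        by_cases hkeys : keys.items = []
        · rw [if_pos hkeys, loopB_keys_empty _ _ _ hkeys]
          simp
        · rw [if_neg hkeys]
          have hsorted : PySem.List.sorted cl (fun p => p.1) false = cl :=
            PySem.List.sorted_eq_self_of_pairwise cl _ (hpair.imp le_of_lt)
          rw [hsorted]
          have main : ∀ (rest before : List PvChest) (dead' : PvDead), before.reverse ++ rest = cl →
              (match (rest.foldl (bodyA (exploreA f) cd keys path) ((none : Option (List Int)), dead')).1 with
               | some a => (some a, (rest.foldl (bodyA (exploreA f) cd keys path) ((none : Option (List Int)), dead')).2)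
               | none => ((none : Option (List Int)), PySem.Set.add (rest.foldl (bodyA (exploreA f) cd keys path) ((none : Option (List Int)), dead')).2
                    (PySem.List.sorted (cl.map (fun t => t.2.1)) (fun x => x) false,
                     PySem.List.sorted keys.items (fun p => p.1) false)))
              = ((loopB (searchB f)
                    (PySem.List.sorted (cl.map (fun t => t.2.1)) (fun x => x) false,
                     PySem.List.sorted keys.items (fun p => p.1) false)
                    keys before rest dead').1.map (fun s => path ++ s),
                 (loopB (searchB f)
                    (PySem.List.sorted (cl.map (fun t => t.2.1)) (fun x => x) false,
                     PySem.List.sorted keys.items (fun p => p.1) false)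
                    keys before rest dead').2) := by
            intro rest
            induction rest with
            | nil => intro before dead' _; simp [loopB]
            | cons t rest ihr =>
              intro before dead' hsplit
              by_cases hc : keys.contains t.2.1 = true
              · have hcd_erase : (cd.erase t.1).items = before.reverse ++ rest := by
                  show (cd.items.filter fun p => !(p.1 == t.1)) = _
                  rw [hitems, ← hsplit]
                  exact erase_items_eq _ _ _ (by rw [hsplit]; exact hpair)
                have hpair' : (before.reverse ++ rest).Pairwise (fun (a b : PvChest) => a.1 < b.1) := by
                  have hsub : (before.reverse ++ rest).Sublist (before.reverse ++ t :: rest) :=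
                    List.Sublist.append_left (List.sublist_cons_self t rest) _
                  rw [hsplit] at hsub
                  exact hpair.sublist hsub
                have hrec := ih (cd.erase t.1) (before.reverse ++ rest) (spendB keys t.2.1 t.2.2)
                  (path ++ [t.1]) dead' hcd_erase hpair'
                rw [List.foldl_cons, bodyA_none _ _ _ _ _ _ hc, hrec]
                rcases hS : searchB f (before.reverse ++ rest) (spendB keys t.2.1 t.2.2) dead' with ⟨o, d2⟩
                cases o with
                | some s =>
                  have hne : path ++ [t.1] ++ s ≠ [] := by simp
                  simp only [Option.map_some]
                  rw [if_neg hne]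
                  rw [foldl_bodyA_some]
                  simp only [loopB, hc, if_true, hS]
                  simp
                | none =>
                  simp only [Option.map_none]
                  simp only [loopB, hc, if_true, hS]
                  exact ihr (t :: before) d2 (by simpa using hsplit)
              · simp only [Bool.not_eq_true] at hc
                rw [List.foldl_cons, bodyA_skip _ _ _ _ _ _ hc]
                simp only [loopB, hc, Bool.false_eq_true, if_false]
                exact ihr (t :: before) dead' (by simpa using hsplit)
          simpa using main cl [] dead rfl

-- dropping the trailing space from the flattened 'digits + space' blocks is ' '.join
lemma flat_drop : ∀ a : List Int, a ≠ [] →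
    (a.flatMap (fun i => PySem.Int.toChars i ++ [' '])).dropLast
      = PySem.Chars.join [' '] (a.map PySem.Int.toChars) := by
  intro a
  induction a with
  | nil => intro h; exact absurd rfl h
  | cons x t ih =>
    intro _
    cases t with
    | nil => simp [PySem.Chars.join_singleton]
    | cons y tt =>
      have hne2 : ((y :: tt).flatMap (fun i => PySem.Int.toChars i ++ [' '])) ≠ [] := by
        simp [List.flatMap_cons]
      rw [List.flatMap_cons, List.dropLast_append_of_ne_nil hne2, ih (by simp)]
      conv_rhs => rw [List.map_cons, List.map_cons, PySem.Chars.join_cons_cons]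
      simp [List.append_assoc]

-- A's string assembly (digits + trailing space, then s[:-1]) is ' '.join on a nonempty answer
lemma string_eq (a : List Int) (h : a ≠ []) :
    String.ofList (PySem.List.slice (a.foldl (fun s i => s ++ PySem.Int.toChars i ++ [' ']) []) none (some (-1)))
      = PySem.Str.join " " (a.map PySem.Int.toStr) := by
  have hlist : (PySem.List.slice (a.foldl (fun s i => s ++ PySem.Int.toChars i ++ [' ']) []) none (some (-1)))
      = PySem.Chars.join [' '] (a.map PySem.Int.toChars) := by
    rw [PySem.List.slice_to_neg_one]
    have hb : (fun (s : List Char) (i : Int) => s ++ PySem.Int.toChars i ++ [' '])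
        = (fun (s : List Char) (i : Int) => s ++ (PySem.Int.toChars i ++ [' '])) := by
      funext s i; simp [List.append_assoc]
    rw [hb, PySem.List.foldl_append_eq_flatMap]
    simpa using flat_drop a h
  have hjoin : (PySem.Str.join " " (a.map PySem.Int.toStr)).toList
      = PySem.Chars.join [' '] (a.map PySem.Int.toChars) := by
    rw [PySem.Str.toList_join]
    have hm : (a.map PySem.Int.toStr).map String.toList = a.map PySem.Int.toChars := by
      simp [List.map_map, PySem.Int.toList_toStr]
    rw [hm]
    rfl
  rw [hlist, ← hjoin, String.ofList_toList]

-- ===== VERDICT (by name: the statement is the Claim_ definition above) =====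
theorem solve_spec : Claim_unchanged_solve := by
  intro initial contents _
  simp only [Spec_solve, D_solve]
  intro hne
  have hitems : ((PySem.List.pyRange 0 (PySem.List.len contents)).foldl
        (fun d i => d.insert (i + 1) ((PySem.List.pyGetD contents i (0, [])).1, (PySem.List.pyGetD contents i (0, [])).2))
        (PySem.Dict.empty : PySem.Dict Int (Int × List Int))).items
      = (PySem.List.enumerate contents).map (fun p => (p.1 + 1, p.2.1, p.2.2)) := by
    rw [PySem.Dict.items_foldl_insert_fresh (PySem.List.pyRange 0 (PySem.List.len contents))
      (fun i => i + 1)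
      (fun i => ((PySem.List.pyGetD contents i (0, [])).1, (PySem.List.pyGetD contents i (0, [])).2))
      PySem.Dict.empty (fun a _ => PySem.Dict.contains_empty _)
      ((PySem.List.nodup_pyRange_one 0 (PySem.List.len contents)).map (add_left_injective 1))]
    rw [PySem.List.enumerate_eq_map_pyRange contents (0, []), List.map_map]
    rfl
  have hpair : ((PySem.List.enumerate contents).map (fun p => (p.1 + 1, p.2.1, p.2.2))).Pairwise
      (fun (a b : PvChest) => a.1 < b.1) := by
    rw [List.pairwise_map]
    exact (PySem.List.pairwise_lt_enumerate contents 0).imp (by intro a b h; simpa using h)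
  have hkeys : initial.foldl (fun d key => if d.contains key then d.modify key 0 (· + 1) else d.insert key 1)
        (PySem.Dict.empty : PySem.Dict Int Int)
      = initial.foldl (fun d k => d.insert k (d.getD k 0 + 1)) PySem.Dict.empty :=
    PySem.List.foldl_congr_mem _ _ _ _ (fun acc x _ => addOne_eq acc x)
  have hlen : contents.length = ((PySem.List.enumerate contents).map (fun p => (p.1 + 1, p.2.1, p.2.2))).length := by
    simp [PySem.List.length_enumerate]
  simp only [solve, solve_alt, hkeys, hlen]
  rw [explore_eq _ _ _ _ _ _ hitems hpair]
  rcases hS : (searchB (((PySem.List.enumerate contents).map (fun p => (p.1 + 1, p.2.1, p.2.2))).length + 1)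
      ((PySem.List.enumerate contents).map (fun p => (p.1 + 1, p.2.1, p.2.2)))
      (initial.foldl (fun d k => d.insert k (d.getD k 0 + 1)) PySem.Dict.empty) PySem.Set.empty).1 with
    _ | a
  · simp
  · have hclne : ((PySem.List.enumerate contents).map (fun p => (p.1 + 1, p.2.1, p.2.2))) ≠ [] := by
      cases contents with
      | nil => exact absurd rfl hne
      | cons c cs => simp [PySem.List.enumerate]
    have ha : a ≠ [] := searchB_some_ne_nil _ _ _ _ _ hclne hS
    simp only [Option.map_some, List.nil_append]
    rw [if_neg ha]
    exact string_eq a ha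

theorem solve_changed : Claim_changed_solve := by
  unfold Claim_changed_solve; decide

theorem solve_tight : Claim_exact_solve := by
  intro initial contents _ hD
  simp only [D_solve] at hD
  subst hD
  have hA : solve initial [] = "IMPOSSIBLE" := by
    simp [solve, exploreA, PySem.List.pyRange, PySem.Set.contains, PySem.Dict.empty]
  have hB : solve_alt initial [] = "" := by
    simp [solve_alt, searchB, PySem.List.enumerate, PySem.Set.contains]
    rfl
  rw [hA, hB]
  decide
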